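-- pv_equiv track=rewrite | github.com/Ton1965/AC_RemoteDecode | generate.py | convert2Durations
-- ===== SOURCE A (Python) =====
-- Leaders = {'L1' : '000127', 'L2' : '94', 'L3' : '000290', 'U' : '000d05'}
--
-- digits = {'0' : '12', '1' : '36'}
--
-- def convert2Durations(string):
--   currentByte = ''
--   converted = ''
--   for b in string:
--     currentByte = currentByte + b
--     if currentByte in digits:
--       converted = converted + '12' + digits[currentByte]
--     elif currentByte in Leaders:
--       converted = converted + Leaders[currentByte]
--     elif currentByte == 'L':
--       continue
--     currentByte = ''
--
--   return converted
-- ===== SOURCE B (Python) =====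
-- Leaders = {'L1' : '000127', 'L2' : '94', 'L3' : '000290', 'U' : '000d05'}
--
-- digits = {'0' : '12', '1' : '36'}
--
-- def convert2Durations(string):
--   # index-driven scan with one character of lookahead for 'L'; pieces joined at the end
--   out = []
--   i = 0
--   n = len(string)
--   while i < n:
--     c = string[i]
--     if c in digits:
--       out.append('12' + digits[c])
--       i += 1
--     elif c == 'U':
--       out.append(Leaders['U'])
--       i += 1
--     elif c == 'L':
--       two = string[i:i+2]
--       if two in Leaders:
--         out.append(Leaders[two])
--       i += 2
--     else:
--       i += 1
--   return ''.join(out)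
-- ===== Notes on version B (the rewrite author's own statement) =====
-- stated objective: alternative
-- what changed: Replaced the accumulator/continue state machine (running currentByte buffer) with an index-driven scan that looks ahead one character after a leader marker and joins collected pieces at the end instead of concatenating into a running string.
import Mathlib
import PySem

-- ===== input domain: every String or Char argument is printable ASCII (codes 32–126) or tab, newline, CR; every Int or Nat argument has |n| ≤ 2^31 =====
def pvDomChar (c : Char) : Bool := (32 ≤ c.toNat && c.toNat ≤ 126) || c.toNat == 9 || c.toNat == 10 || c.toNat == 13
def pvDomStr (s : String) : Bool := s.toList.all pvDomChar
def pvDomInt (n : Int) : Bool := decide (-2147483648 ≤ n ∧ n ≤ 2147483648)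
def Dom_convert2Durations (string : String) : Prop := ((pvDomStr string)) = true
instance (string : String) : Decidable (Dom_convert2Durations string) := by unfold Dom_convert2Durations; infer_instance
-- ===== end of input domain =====

-- B replaces A's running currentByte buffer with an index-driven scan with one-char lookahead after a leader marker, joining pieces at the end (objective: alternative decomposition).

-- ===== PORT A =====
-- module constants (string keys/values kept as List Char, the PySem-exact representation)
def pvLeaders : PySem.Dict (List Char) (List Char) :=
  PySem.Dict.ofList [(['L','1'], ['0','0','0','1','2','7']), (['L','2'], ['9','4']),
                     (['L','3'], ['0','0','0','2','9','0']), (['U'], ['0','0','0','d','0','5'])]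

def pvDigits : PySem.Dict (List Char) (List Char) :=
  PySem.Dict.ofList [(['0'], ['1','2']), (['1'], ['3','6'])]

-- one loop iteration of A: state = (currentByte, converted)
def pvAStep (st : List Char × List Char) (b : Char) : List Char × List Char :=
  let cb := st.1 ++ [b]
  match PySem.Dict.get? pvDigits cb with
  | some v => ([], st.2 ++ ['1','2'] ++ v)
  | none =>
    match PySem.Dict.get? pvLeaders cb with
    | some v => ([], st.2 ++ v)
    | none => if cb = ['L'] then (cb, st.2) else ([], st.2)

def convert2Durations (string : String) : String :=
  String.ofList ((string.toList.foldl pvAStep ([], [])).2)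

-- ===== PORT B =====
-- index-driven scan: consume 1 char normally, 2 chars after an 'L' (the while loop of Source B as
-- the obvious structural recursion on the remaining suffix; string[i:i+2] is the 2-char lookahead)
def pvBGo : List Char → List (List Char)
  | [] => []
  | c :: rest =>
    match PySem.Dict.get? pvDigits [c] with
    | some v => (['1','2'] ++ v) :: pvBGo rest
    | none =>
      if c = 'U' then PySem.Dict.getD pvLeaders ['U'] [] :: pvBGo rest
      else if c = 'L' then
        match rest with
        | [] => []
        | d :: rest' =>
          match PySem.Dict.get? pvLeaders ['L', d] with
          | some v => v :: pvBGo rest'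
          | none => pvBGo rest'
      else pvBGo rest

def convert2Durations_alt (string : String) : String :=
  String.ofList (PySem.Chars.join [] (pvBGo string.toList))

-- ===== PRECONDITION & SPEC =====
def Spec_convert2Durations (string : String) (out : String) : Prop := out = convert2Durations_alt string
instance (string : String) (out : String) : Decidable (Spec_convert2Durations string out) := by unfold Spec_convert2Durations; infer_instance

-- ===== CLAIM (what is proved, stated in full; the proofs are below) =====
def Claim_equal_convert2Durations : Prop := ∀ (string : String), Dom_convert2Durations string → Spec_convert2Durations string (convert2Durations string)

-- ===== LEMMAS AND PROOFS =====

lemma pv_join_cons (x : List Char) (xs : List (List Char)) :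
    PySem.Chars.join [] (x :: xs) = x ++ PySem.Chars.join [] xs := by
  cases xs <;> simp [PySem.Chars.join_nil, PySem.Chars.join_singleton, PySem.Chars.join_cons_cons]

lemma pv_digits_mk : pvDigits = PySem.Dict.mk [(['0'], ['1','2']), (['1'], ['3','6'])] := by decide

lemma pv_leaders_mk : pvLeaders = PySem.Dict.mk [(['L','1'], ['0','0','0','1','2','7']),
    (['L','2'], ['9','4']), (['L','3'], ['0','0','0','2','9','0']), (['U'], ['0','0','0','d','0','5'])] := by
  decide

lemma pv_digits_pair_none (a b : Char) : PySem.Dict.get? pvDigits [a, b] = none := by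
  simp [pv_digits_mk, PySem.Dict.get?]

lemma pv_leaders_single (c : Char) (h : c ≠ 'U') : PySem.Dict.get? pvLeaders [c] = none := by
  simp [pv_leaders_mk, PySem.Dict.get?, Ne.symm h]

lemma pv_main (l : List Char) (acc : List Char) :
    (l.foldl pvAStep ([], acc)).2 = acc ++ PySem.Chars.join [] (pvBGo l) := by
  induction l using pvBGo.induct generalizing acc with
  | case1 => simp [pvBGo, PySem.Chars.join_nil]
  | case2 c rest v hd ih =>
      rw [pvBGo.eq_def]
      simp only [List.foldl_cons, pvAStep, List.nil_append, hd, pv_join_cons]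
      rw [ih]; simp
  | case3 rest hd ih =>
      rw [pvBGo.eq_def]
      simp only [List.foldl_cons, pvAStep, List.nil_append, hd, reduceIte, pv_join_cons,
        pv_leaders_mk, PySem.Dict.get?_mk_cons, PySem.Dict.getD]
      norm_num [PySem.Dict.get?_mk_cons]
      rw [ih]; simp
  | case4 hd _ =>
      rw [pvBGo.eq_def]
      simp [pvAStep, hd, pv_leaders_single 'L' (by decide), PySem.Chars.join_nil]
  | case5 d rest' v hp hd _ ih =>
      rw [pvBGo.eq_def]
      simp only [List.foldl_cons, pvAStep, List.cons_append, List.nil_append, hd, pv_leaders_single 'L' (by decide), reduceIte,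
        pv_digits_pair_none, hp]
      rw [ih]; simp [pv_join_cons]
  | case6 d rest' hp hd _ ih =>
      rw [pvBGo.eq_def]
      simp only [List.foldl_cons, pvAStep, List.cons_append, List.nil_append, hd, pv_leaders_single 'L' (by decide), reduceIte,
        pv_digits_pair_none, hp]
      simp [ih]
  | case7 c rest hd hU hL ih =>
      rw [pvBGo.eq_def]
      simp only [List.foldl_cons, pvAStep, List.nil_append, hd,
        pv_leaders_single c hU, if_neg hU, if_neg hL,
        if_neg (by simp [hL] : ¬([c] = ['L']))]
      rw [ih]

-- ===== VERDICT (by name: the statement is the Claim_ definition above) =====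
theorem convert2Durations_spec : Claim_equal_convert2Durations := by
  intro s _
  unfold Spec_convert2Durations convert2Durations convert2Durations_alt
  rw [pv_main]
  simp
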